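-- pv_equiv track=rewrite | github.com/gh0stintheshe11/LeetCode-Solutions | solutions/1053.previous-permutation-with-one-swap/Python3.py | prevPermOpt1
-- ===== SOURCE A (Python) =====
-- from typing import List
--
-- def prevPermOpt1(arr: List[int]) -> List[int]:
--     n = len(arr)
--     # Step 1: Finding the first decreasing element from the right side.
--     for i in range(n-2, -1, -1):
--         if arr[i] > arr[i+1]:
--             break
--     else:
--         return arr  # The array is already the smallest permutation.
--
--     # Step 2: Find the largest element to the right of arr[i] that is smaller than arr[i].
--     for j in range(n-1, i, -1):
--         if arr[j] < arr[i] and arr[j] != arr[j-1]: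
--             arr[i], arr[j] = arr[j], arr[i]
--             break
--
--     return arr
-- ===== SOURCE B (Python) =====
-- from typing import List
--
-- def prevPermOpt1(arr: List[int]) -> List[int]:
--     n = len(arr)
--     # Step 1: find the pivot, the rightmost i with arr[i] > arr[i+1].
--     for i in range(n - 2, -1, -1):
--         if arr[i] > arr[i + 1]:
--             break
--     else:
--         return arr  # already the smallest permutation
--     # Step 2, in two plain passes over the (non-decreasing) suffix:
--     # the largest value smaller than the pivot, then its leftmost position.
--     target = max(x for x in arr[i + 1:] if x < arr[i])
--     j = arr.index(target, i + 1)
--     arr[i], arr[j] = arr[j], arr[i]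
--     return arr
-- ===== Notes on version B (the rewrite author's own statement) =====
-- stated objective: simpler
-- what changed: Step 2's single backward scan with the arr[j] != arr[j-1] dedup test is replaced by two separate forward passes: max() of the suffix values below the pivot, then arr.index(target, i+1) for its leftmost occurrence; correctness rests on the suffix being non-decreasing.
import Mathlib
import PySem

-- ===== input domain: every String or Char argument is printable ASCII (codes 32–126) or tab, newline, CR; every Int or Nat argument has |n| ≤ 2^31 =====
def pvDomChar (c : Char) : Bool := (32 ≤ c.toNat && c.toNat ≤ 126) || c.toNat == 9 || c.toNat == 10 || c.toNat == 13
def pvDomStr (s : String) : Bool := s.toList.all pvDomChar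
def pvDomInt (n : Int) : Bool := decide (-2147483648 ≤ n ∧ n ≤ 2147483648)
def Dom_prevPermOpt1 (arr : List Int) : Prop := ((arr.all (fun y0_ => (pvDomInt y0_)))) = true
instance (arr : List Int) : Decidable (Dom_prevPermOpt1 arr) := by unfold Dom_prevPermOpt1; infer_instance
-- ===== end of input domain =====

-- B replaces A's combined backward dedup scan (step 2) by two separate passes —
-- max of the smaller suffix values, then leftmost index of that value — relying on
-- the suffix being non-decreasing; objective: simpler.  Both A and B mutate `arr`
-- in place in Python (identically); the equivalence proved here is about the
-- returned value.

-- ===== PORT A =====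
-- 'for i in range(n-2,-1,-1): if arr[i] > arr[i+1]: break / else: return arr'
def pivotLoopA (arr : List Int) : Nat → Option Nat
  | 0 => if PySem.List.pyGetD arr ((0 : Nat) : Int) 0 > PySem.List.pyGetD arr ((1 : Nat) : Int) 0 then some 0 else none
  | i + 1 =>
    if PySem.List.pyGetD arr ((i + 1 : Nat) : Int) 0 > PySem.List.pyGetD arr ((i + 2 : Nat) : Int) 0 then some (i + 1)
    else pivotLoopA arr i

-- 'for j in range(n-1, i, -1): if arr[j] < arr[i] and arr[j] != arr[j-1]: swap; break'
def jLoopA (arr : List Int) (ai : Int) (i : Nat) : Nat → Option Nat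
  | 0 => none
  | j + 1 =>
    if j + 1 ≤ i then none
    else if PySem.List.pyGetD arr ((j + 1 : Nat) : Int) 0 < ai ∧
            PySem.List.pyGetD arr ((j + 1 : Nat) : Int) 0 ≠ PySem.List.pyGetD arr ((j : Nat) : Int) 0 then
      some (j + 1)
    else jLoopA arr ai i j

def prevPermOpt1 (arr : List Int) : List Int :=
  let n := arr.length
  if n < 2 then arr  -- range(n-2,-1,-1) is empty: the for/else returns arr
  else
    match pivotLoopA arr (n - 2) with
    | none => arr
    | some i =>
      match jLoopA arr (PySem.List.pyGetD arr (i : Int) 0) i (n - 1) with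
      | none => arr
      | some j =>
        PySem.List.pySetD (PySem.List.pySetD arr (i : Int) (PySem.List.pyGetD arr (j : Int) 0))
          (j : Int) (PySem.List.pyGetD arr (i : Int) 0)

-- ===== PORT B =====
-- step 1 of Source B: the same pivot scan
def pivotLoopB (arr : List Int) : Nat → Option Nat
  | 0 => if PySem.List.pyGetD arr ((0 : Nat) : Int) 0 > PySem.List.pyGetD arr ((1 : Nat) : Int) 0 then some 0 else none
  | i + 1 =>
    if PySem.List.pyGetD arr ((i + 1 : Nat) : Int) 0 > PySem.List.pyGetD arr ((i + 2 : Nat) : Int) 0 then some (i + 1)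
    else pivotLoopB arr i

def prevPermOpt1_alt (arr : List Int) : List Int :=
  let n := arr.length
  if n < 2 then arr
  else
    match pivotLoopB arr (n - 2) with
    | none => arr
    | some i =>
      let ai := PySem.List.pyGetD arr (i : Int) 0
      let suffix := PySem.List.slice arr (some ((i : Int) + 1)) none   -- arr[i+1:]
      match PySem.List.max? (suffix.filter (fun x => decide (x < ai))) (fun x => x) with
      | none => arr   -- max() of empty sequence raises in Python; unreachable here
      | some target =>
        match PySem.List.index? suffix target with
        | none => arr -- unreachable: target ∈ suffix
        | some jrel =>
          let j := i + 1 + jrel                     -- arr.index(target, i+1)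
          PySem.List.pySetD (PySem.List.pySetD arr (i : Int) (PySem.List.pyGetD arr (j : Int) 0))
            (j : Int) ai

-- ===== PRECONDITION & SPEC =====
def Spec_prevPermOpt1 (arr : List Int) (out : List Int) : Prop := out = prevPermOpt1_alt arr
instance (arr : List Int) (out : List Int) : Decidable (Spec_prevPermOpt1 arr out) := by unfold Spec_prevPermOpt1; infer_instance

-- ===== CLAIM (what is proved, stated in full; the proofs are below) =====
def Claim_equal_prevPermOpt1 : Prop := ∀ (arr : List Int), Dom_prevPermOpt1 arr → Spec_prevPermOpt1 arr (prevPermOpt1 arr)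

-- ===== LEMMAS AND PROOFS =====

theorem pivotLoopB_eq (arr : List Int) (m : Nat) : pivotLoopB arr m = pivotLoopA arr m := by
  induction m with
  | zero => rfl
  | succ i ih => simp only [pivotLoopA, pivotLoopB, ih]

theorem pivot_spec (arr : List Int) (m i : Nat) (h : pivotLoopA arr m = some i) :
    i ≤ m ∧ arr.getD (i + 1) 0 < arr.getD i 0 ∧
      ∀ k, i < k → k ≤ m → arr.getD k 0 ≤ arr.getD (k + 1) 0 := by
  induction m with
  | zero =>
    simp only [pivotLoopA, PySem.List.pyGetD_natCast] at h
    split at h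
    · rename_i hgt
      cases h
      exact ⟨le_refl _, by simpa using hgt, fun k hk1 hk2 => by omega⟩
    · cases h
  | succ m ih =>
    simp only [pivotLoopA, PySem.List.pyGetD_natCast] at h
    split at h
    · rename_i hgt
      cases h
      refine ⟨le_refl _, by simpa using hgt, fun k hk1 hk2 => by omega⟩
    · rename_i hle
      have := ih (by simpa [pivotLoopA, PySem.List.pyGetD_natCast] using h)
      refine ⟨by omega, this.2.1, fun k hk1 hk2 => ?_⟩
      rcases Nat.lt_or_ge k (m + 1) with hk | hk
      · exact this.2.2 k hk1 (by omega)
      · have : k = m + 1 := by omega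
        subst this
        show arr.getD (m + 1) 0 ≤ arr.getD (m + 2) 0
        omega

-- jLoopA finds q when q satisfies the condition and nothing above it (up to m) does
theorem jLoop_finds (arr : List Int) (ai : Int) (i q : Nat)
    (hq : i < q)
    (hcond : arr.getD q 0 < ai ∧ arr.getD q 0 ≠ arr.getD (q - 1) 0)
    (m : Nat) (hqm : q ≤ m)
    (habove : ∀ k, q < k → k ≤ m → ¬ (arr.getD k 0 < ai ∧ arr.getD k 0 ≠ arr.getD (k - 1) 0)) :
    jLoopA arr ai i m = some q := by
  induction m with
  | zero => omega
  | succ m ih =>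
    simp only [jLoopA, PySem.List.pyGetD_natCast]
    rcases Nat.lt_or_ge m (q) with hm | hm
    · -- m + 1 = q
      have hqe : q = m + 1 := by omega
      subst hqe
      rw [if_neg (by omega), if_pos (by simpa using hcond)]
    · -- q ≤ m : current index m+1 > q fails the condition
      rw [if_neg (by omega), if_neg]
      · exact ih hm (fun k h1 h2 => habove k h1 (by omega))
      · have := habove (m + 1) (by omega) (le_refl _)
        simpa using this

-- monotonicity of the suffix from the pivot's sortedness facts
theorem suffix_mono (arr : List Int) (i : Nat)
    (hsort : ∀ k, i < k → k ≤ arr.length - 2 → arr.getD k 0 ≤ arr.getD (k + 1) 0) :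
    ∀ a b, i < a → a ≤ b → b < arr.length → arr.getD a 0 ≤ arr.getD b 0 := by
  intro a b ha hab hb
  induction b with
  | zero => omega
  | succ b ih =>
    rcases Nat.lt_or_ge b a with h | h
    · have : a = b + 1 := by omega
      simp [this]
    · exact le_trans (ih (by omega) (by omega)) (hsort b (by omega) (by omega))

theorem getD_drop (arr : List Int) (a t : Nat) :
    (arr.drop a).getD t 0 = arr.getD (a + t) 0 := by
  simp [List.getD, List.getElem?_drop]

theorem prevPermOpt1_eq_alt (arr : List Int) : prevPermOpt1 arr = prevPermOpt1_alt arr := by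
  unfold prevPermOpt1 prevPermOpt1_alt
  by_cases hn : arr.length < 2
  · simp [hn]
  simp only [if_neg hn]
  rw [pivotLoopB_eq]
  cases hpiv : pivotLoopA arr (arr.length - 2) with
  | none => rfl
  | some i =>
    dsimp only
    obtain ⟨him, hdec, hsort⟩ := pivot_spec arr _ i hpiv
    have hi1 : i + 1 < arr.length := by omega
    set ai := arr.getD i 0 with hai
    have hAi : PySem.List.pyGetD arr (i : Int) 0 = ai := by
      simp [PySem.List.pyGetD_natCast, hai]
    rw [hAi]
    have hsuf : PySem.List.slice arr (some ((i : Int) + 1)) none = arr.drop (i + 1) := by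
      have : ((i : Int) + 1) = ((i + 1 : Nat) : Int) := by push_cast; ring
      rw [this, PySem.List.slice_from_natCast]
    rw [hsuf]
    set suffix := arr.drop (i + 1) with hsufdef
    have hsuflen : suffix.length = arr.length - (i + 1) := by simp [hsufdef]
    have hmono := suffix_mono arr i hsort
    -- the filtered list is nonempty
    have hmem0 : arr.getD (i + 1) 0 ∈ suffix.filter (fun x => decide (x < ai)) := by
      have h0 : suffix.getD 0 0 = arr.getD (i + 1) 0 := by
        rw [hsufdef, getD_drop]
      have hlen0 : 0 < suffix.length := by omega
      have : suffix.getD 0 0 ∈ suffix := by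
        rw [List.getD_eq_getElem suffix 0 hlen0]
        exact List.getElem_mem hlen0
      rw [h0] at this
      exact List.mem_filter.mpr ⟨this, by simpa using hdec⟩
    cases hmax : PySem.List.max? (suffix.filter (fun x => decide (x < ai))) (fun x => x) with
    | none =>
      rw [PySem.List.max?_eq_none_iff] at hmax
      rw [hmax] at hmem0
      cases hmem0
    | some target =>
      have htmem : target ∈ suffix.filter (fun x => decide (x < ai)) := by
        have := PySem.List.max?_mem hmax
        exact this
      have htsuf : target ∈ suffix := (List.mem_filter.mp htmem).1
      have htlt : target < ai := by simpa using (List.mem_filter.mp htmem).2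
      have htmax : ∀ y ∈ suffix, y < ai → y ≤ target := by
        intro y hy hylt
        have := PySem.List.max?_isMax hmax y (List.mem_filter.mpr ⟨hy, by simpa using hylt⟩)
        simpa using this
      cases hidx : PySem.List.index? suffix target with
      | none =>
        rw [PySem.List.index?_eq_none_iff] at hidx
        exact absurd htsuf hidx
      | some jrel =>
        obtain ⟨hjrel, hval, hbefore⟩ := PySem.List.getElem_of_index?_eq_some hidx
        set q := i + 1 + jrel with hqdef
        have hqn : q < arr.length := by omega
        have hgq : arr.getD q 0 = target := by
          rw [hqdef, ← getD_drop arr (i + 1) jrel, ← hsufdef,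
            List.getD_eq_getElem _ _ hjrel, hval]
        have hgsuf : ∀ t, t < suffix.length → suffix.getD t 0 = arr.getD (i + 1 + t) 0 := by
          intro t ht; rw [hsufdef]; exact getD_drop arr (i + 1) t
        -- the condition holds at q
        have hcondq : arr.getD q 0 < ai ∧ arr.getD q 0 ≠ arr.getD (q - 1) 0 := by
          refine ⟨by rw [hgq]; exact htlt, ?_⟩
          rw [hgq]
          cases jrel with
          | zero =>
            have : q - 1 = i := by omega
            rw [this, ← hai]; omega
          | succ t =>
            have hq1 : q - 1 = i + 1 + t := by omega
            rw [hq1, ← hgsuf t (by omega)]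
            have := hbefore t (by omega)
            rw [List.getD_eq_getElem _ _ (show t < suffix.length by omega)]
            exact fun h => this h.symm
        -- nothing above q satisfies the condition
        have habove : ∀ k, q < k → k ≤ arr.length - 1 →
            ¬ (arr.getD k 0 < ai ∧ arr.getD k 0 ≠ arr.getD (k - 1) 0) := by
          rintro k hk1 hk2 ⟨hlt, hne⟩
          have hkn : k < arr.length := by omega
          have h1 : arr.getD q 0 ≤ arr.getD k 0 := hmono q k (by omega) (by omega) hkn
          have h2 : arr.getD k 0 ≤ target := by
            have hksuf : arr.getD k 0 ∈ suffix := by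
              have : suffix.getD (k - (i + 1)) 0 = arr.getD k 0 := by
                have := hgsuf (k - (i + 1)) (by omega)
                rwa [show i + 1 + (k - (i + 1)) = k by omega] at this
              rw [← this, List.getD_eq_getElem _ _ (show k - (i + 1) < suffix.length by omega)]
              exact List.getElem_mem _
            exact htmax _ hksuf hlt
          have hkeq : arr.getD k 0 = target := by rw [← hgq] at h2 ⊢; omega
          have h3 : arr.getD q 0 ≤ arr.getD (k - 1) 0 := hmono q (k - 1) (by omega) (by omega) (by omega)
          have h4 : arr.getD (k - 1) 0 ≤ arr.getD k 0 := hmono (k - 1) k (by omega) (by omega) hkn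
          rw [hgq] at h1 h3
          apply hne
          omega
        have hj := jLoop_finds arr ai i q (by omega) hcondq (arr.length - 1) (by omega) habove
        rw [hj]
        dsimp only
        rw [hidx]

-- ===== VERDICT (by name: the statement is the Claim_ definition above) =====
theorem prevPermOpt1_spec : Claim_equal_prevPermOpt1 := by
  intro arr _
  unfold Spec_prevPermOpt1
  exact prevPermOpt1_eq_alt arr
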